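-- pv_equiv track=rewrite | github.com/tristanmeinhardt-png/NC | nc.py | _math_split_by_keyword
-- ===== SOURCE A (Python) =====
-- from typing import Any, Dict, List, Tuple, Optional, Callable
--
-- def _math_split_by_keyword(expr: str, keyword: str) -> List[str]:
--     """Split by keyword at top-level (paren depth 0). No strings allowed here."""
--     out: List[str] = []
--     buf: List[str] = []
--     i = 0
--     n = len(expr)
--     depth = 0
--     kw = keyword
--     kwlen = len(kw)
--
--     def flush():
--         part = "".join(buf).strip()
--         out.append(part)
--         buf.clear()
--
--     while i < n:
--         ch = expr[i]
--         if ch == "(":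
--             depth += 1
--             buf.append(ch)
--             i += 1
--             continue
--         if ch == ")":
--             depth = max(0, depth - 1)
--             buf.append(ch)
--             i += 1
--             continue
--
--         if depth == 0:
--             # match whole-word keyword
--             if expr[i:i+kwlen].lower() == kw.lower():
--                 before = expr[i-1] if i > 0 else " "
--                 after = expr[i+kwlen] if i + kwlen < n else " "
--                 if (not before.isalnum()) and (before != "_") and (not after.isalnum()) and (after != "_"):
--                     flush()
--                     i += kwlen
--                     continue
--
--         buf.append(ch)
--         i += 1
--
--     flush()
--     # remove possible empty tails
--     return [p for p in out if p is not None]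
-- ===== SOURCE B (Python) =====
-- from typing import List
--
-- def _math_split_by_keyword(expr: str, keyword: str) -> List[str]:
--     """Split by keyword at top-level (paren depth 0): depth array + cut positions, then slice."""
--     n = len(expr)
--     k = len(keyword)
--     kl = keyword.lower()
--     el = expr.lower()
--     # pass 1: paren depth at each index
--     depth = []
--     d = 0
--     for ch in expr:
--         depth.append(d)
--         if ch == "(":
--             d += 1
--         elif ch == ")":
--             d = max(0, d - 1)
--     # pass 2: collect non-overlapping whole-word match positions at depth 0
--     cuts = []
--     i = 0
--     while i < n:
--         if depth[i] == 0 and el[i:i + k] == kl: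
--             before = expr[i - 1] if i > 0 else " "
--             after = expr[i + k] if i + k < n else " "
--             if (not before.isalnum()) and before != "_" and (not after.isalnum()) and after != "_":
--                 cuts.append(i)
--                 i += k
--                 continue
--         i += 1
--     # pass 3: slice between cuts
--     parts = []
--     start = 0
--     for c in cuts:
--         parts.append(expr[start:c].strip())
--         start = c + k
--     parts.append(expr[start:].strip())
--     return parts
-- ===== Notes on version B (the rewrite author's own statement) =====
-- stated objective: alternative
-- what changed: A's single scan that buffers characters one by one and flushes on each keyword match is replaced by three separate passes: a precomputed paren-depth array, a scan over a once-lowercased copy collecting cut positions, and slicing the original string between cuts.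
-- outside the precondition, e.g. on _math_split_by_keyword('x (a) y', '(a)'): A returns ['x (a) y'], B returns ['x', 'y']
import Mathlib
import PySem

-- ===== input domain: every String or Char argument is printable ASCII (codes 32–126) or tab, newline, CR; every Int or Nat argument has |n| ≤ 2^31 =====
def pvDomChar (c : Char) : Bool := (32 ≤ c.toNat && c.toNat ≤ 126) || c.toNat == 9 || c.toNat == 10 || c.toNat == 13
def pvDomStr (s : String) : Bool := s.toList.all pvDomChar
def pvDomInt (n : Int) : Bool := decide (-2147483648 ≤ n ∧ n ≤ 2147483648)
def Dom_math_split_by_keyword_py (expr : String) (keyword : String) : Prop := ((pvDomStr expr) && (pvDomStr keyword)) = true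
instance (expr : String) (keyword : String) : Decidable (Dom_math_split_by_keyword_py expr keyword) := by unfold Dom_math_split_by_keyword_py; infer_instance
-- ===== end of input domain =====

-- B replaces A's single char-buffering scan by three passes (depth array, cut positions, slicing);
-- same return value on Pre_ (nonempty, parenthesis-free keywords); objective: alternative decomposition.

-- ===== PORT A =====
-- A's flush(): out.append("".join(buf).strip()); buf.clear()
def pvFlushA (buf : List Char) (out : List String) : List String :=
  out ++ [String.ofList (PySem.Chars.strip buf)]

-- A's while loop; state (i, depth, buf, out); fuel n+1 covers every terminating run (i advances
-- each iteration except a zero-length-keyword match, where the Python loops forever — outside Pre_).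
-- expr[i:i+kwlen] is written (e.drop i).take kwlen, exact for 0 ≤ i (PySem.List.slice_natCast).
def pvLoopA (e kw : List Char) (n kwlen : Nat) : Nat → Nat → Int → List Char → List String → List String
  | 0, _i, _depth, buf, out => pvFlushA buf out
  | fuel+1, i, depth, buf, out =>
    if i < n then
      let ch := e.getD i ' '
      if ch = '(' then
        pvLoopA e kw n kwlen fuel (i+1) (depth+1) (buf ++ [ch]) out
      else if ch = ')' then
        pvLoopA e kw n kwlen fuel (i+1) (max 0 (depth-1)) (buf ++ [ch]) out
      else if depth = 0 ∧ PySem.Chars.lower ((e.drop i).take kwlen) = PySem.Chars.lower kw then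
        let before := if 0 < i then e.getD (i-1) ' ' else ' '
        let after  := if i + kwlen < n then e.getD (i+kwlen) ' ' else ' '
        if (PySem.Chars.isalnum before = false) ∧ before ≠ '_' ∧
           (PySem.Chars.isalnum after = false) ∧ after ≠ '_' then
          pvLoopA e kw n kwlen fuel (i+kwlen) depth [] (pvFlushA buf out)
        else
          pvLoopA e kw n kwlen fuel (i+1) depth (buf ++ [ch]) out
      else
        pvLoopA e kw n kwlen fuel (i+1) depth (buf ++ [ch]) out
    else
      pvFlushA buf out

def math_split_by_keyword_py (expr : String) (keyword : String) : List String :=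
  let e := expr.toList
  let kw := keyword.toList
  let n := e.length
  let kwlen := kw.length
  let out := pvLoopA e kw n kwlen (n+1) 0 0 [] []
  -- [p for p in out if p is not None]: every p is a str, so the filter keeps everything
  out.filter (fun _p => true)

-- ===== PORT B =====
-- pass 1: paren depth at each index (for ch in expr: depth.append(d); update d)
def pvDepthsB : List Char → Int → List Int
  | [], _d => []
  | ch :: t, d =>
    d :: pvDepthsB t (if ch = '(' then d + 1 else if ch = ')' then max 0 (d - 1) else d)

-- pass 2: non-overlapping whole-word match positions at depth 0 (while loop; same fuel discipline as A's)
def pvCutsB (e el kl : List Char) (depths : List Int) (n k : Nat) : Nat → Nat → List Nat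
  | 0, _i => []
  | fuel+1, i =>
    if i < n then
      if depths.getD i 0 = 0 ∧ (el.drop i).take k = kl then
        let before := if 0 < i then e.getD (i-1) ' ' else ' '
        let after  := if i + k < n then e.getD (i+k) ' ' else ' '
        if (PySem.Chars.isalnum before = false) ∧ before ≠ '_' ∧
           (PySem.Chars.isalnum after = false) ∧ after ≠ '_' then
          i :: pvCutsB e el kl depths n k fuel (i+k)
        else pvCutsB e el kl depths n k fuel (i+1)
      else pvCutsB e el kl depths n k fuel (i+1)
    else []

-- pass 3: slice between consecutive cuts (for c in cuts, threading start)
def pvRenderB (e : List Char) (k : Nat) : Nat → List Nat → List String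
  | start, [] => [String.ofList (PySem.Chars.strip (e.drop start))]
  | start, c :: cs =>
      String.ofList (PySem.Chars.strip ((e.drop start).take (c - start))) :: pvRenderB e k (c + k) cs

def math_split_by_keyword_py_alt (expr : String) (keyword : String) : List String :=
  let e := expr.toList
  let n := e.length
  let k := keyword.toList.length
  let kl := PySem.Chars.lower keyword.toList
  let el := PySem.Chars.lower e
  let depths := pvDepthsB e 0
  let cuts := pvCutsB e el kl depths n k (n+1) 0
  pvRenderB e k 0 cuts

-- ===== PRECONDITION & SPEC =====
-- Pre_ excludes the empty keyword (A loops forever on any expr with a top-level non-word character)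
-- and keywords containing '(' or ')' when they occur case-insensitively in expr (there A's paren
-- branches pre-empt the match test and its match-skip bypasses depth tracking, so the split is an
-- accident of A's scan; B treats such keywords uniformly).
def Pre_math_split_by_keyword_py (expr : String) (keyword : String) : Prop :=
  keyword.toList ≠ [] ∧
    (('(' ∉ keyword.toList ∧ ')' ∉ keyword.toList) ∨
      ¬ (PySem.Chars.lower keyword.toList <:+: PySem.Chars.lower expr.toList))
instance (expr : String) (keyword : String) : Decidable (Pre_math_split_by_keyword_py expr keyword) := by
  unfold Pre_math_split_by_keyword_py; infer_instance
def pvWitness_math_split_by_keyword_py : String × String := ("a and (b and c)", "and")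

def Spec_math_split_by_keyword_py (expr : String) (keyword : String) (out : List String) : Prop := out = math_split_by_keyword_py_alt expr keyword
instance (expr : String) (keyword : String) (out : List String) : Decidable (Spec_math_split_by_keyword_py expr keyword out) := by unfold Spec_math_split_by_keyword_py; infer_instance

-- ===== CLAIM (what is proved, stated in full; the proofs are below) =====
def Claim_equal_math_split_by_keyword_py : Prop := ∀ (expr : String) (keyword : String), Dom_math_split_by_keyword_py expr keyword → Pre_math_split_by_keyword_py expr keyword → Spec_math_split_by_keyword_py expr keyword (math_split_by_keyword_py expr keyword)

-- ===== LEMMAS AND PROOFS =====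

-- depth one step / over a prefix (proof-side view of both programs' depth updates)
def pvStep (d : Int) (ch : Char) : Int :=
  if ch = '(' then d + 1 else if ch = ')' then max 0 (d - 1) else d

def pvDAfter (d : Int) (xs : List Char) : Int := xs.foldl pvStep d

lemma pvDepthsB_getD (xs : List Char) (d : Int) (i : Nat) (h : i < xs.length) :
    (pvDepthsB xs d).getD i 0 = pvDAfter d (xs.take i) := by
  induction xs generalizing d i with
  | nil => simp at h
  | cons ch t ih =>
    cases i with
    | zero => simp [pvDepthsB, pvDAfter]
    | succ j =>
      simp only [pvDepthsB, List.getD_cons_succ, List.take_succ_cons]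
      rw [ih _ j (by simpa using h)]
      simp [pvDAfter, pvStep]

lemma pvDAfter_parenfree (seg : List Char) (d : Int)
    (h : ∀ c ∈ seg, c ≠ '(' ∧ c ≠ ')') : pvDAfter d seg = d := by
  induction seg generalizing d with
  | nil => rfl
  | cons c t ih =>
    have hc := h c (by simp)
    simp only [pvDAfter, List.foldl_cons]
    rw [show pvStep d c = d by simp [pvStep, hc.1, hc.2]]
    exact ih d (fun x hx => h x (by simp [hx]))

lemma pvCharLo (c : Char) (h : 'A' ≤ c) : 65 ≤ c.toNat := by
  rw [Char.le_def] at h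
  exact UInt32.le_iff_toNat_le.mp h

lemma pvCharHi (c : Char) (h : c ≤ 'Z') : c.toNat ≤ 90 := by
  rw [Char.le_def] at h
  exact UInt32.le_iff_toNat_le.mp h

lemma pvLowerChar_paren (c p : Char) (hp : p = '(' ∨ p = ')')
    (h : PySem.Chars.lowerChar c = p) : c = p := by
  unfold PySem.Chars.lowerChar at h
  split_ifs at h with hu
  · exfalso
    have hb : 'A' ≤ c ∧ c ≤ 'Z' := by simpa [PySem.Chars.isupper] using hu
    have hlo := pvCharLo c hb.1
    have hhi := pvCharHi c hb.2
    have hv : (c.toNat + 32).isValidChar := by unfold Nat.isValidChar; left; omega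
    have h2 := congrArg Char.toNat h
    rw [Char.toNat_ofNat, if_pos hv] at h2
    rcases hp with rfl | rfl <;>
      simp only [show ('(').toNat = 40 from rfl, show (')').toNat = 41 from rfl] at h2 <;> omega
  · exact h

-- the matched span has no parentheses (its lowercase image is kl, which is paren-free)
lemma pvSeg_parenfree (kw seg : List Char) (hkl : '(' ∉ kw) (hkr : ')' ∉ kw)
    (h : PySem.Chars.lower seg = PySem.Chars.lower kw) :
    ∀ c ∈ seg, c ≠ '(' ∧ c ≠ ')' := by
  intro c hc
  have hmem : PySem.Chars.lowerChar c ∈ PySem.Chars.lower kw := by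
    rw [← h]
    exact List.mem_map_of_mem hc
  simp only [PySem.Chars.lower, List.mem_map] at hmem
  obtain ⟨c', hc', heq⟩ := hmem
  constructor
  · rintro rfl
    have : PySem.Chars.lowerChar '(' = '(' := rfl
    rw [this] at heq
    exact hkl ((pvLowerChar_paren c' '(' (Or.inl rfl) heq) ▸ hc')
  · rintro rfl
    have : PySem.Chars.lowerChar ')' = ')' := rfl
    rw [this] at heq
    exact hkr ((pvLowerChar_paren c' ')' (Or.inr rfl) heq) ▸ hc')

lemma pvLowerSlice (e : List Char) (i k : Nat) :
    PySem.Chars.lower ((e.drop i).take k) = ((PySem.Chars.lower e).drop i).take k := by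
  simp [PySem.Chars.lower, List.map_take, List.map_drop]

lemma pvBufExt (e : List Char) (start i : Nat) (hsi : start ≤ i) (hin : i < e.length) :
    (e.drop start).take (i - start) ++ [e[i]] = (e.drop start).take (i + 1 - start) := by
  have hd : i - start < (e.drop start).length := by simp; omega
  have hg : (e.drop start)[i - start] = e[i] := by
    rw [List.getElem_drop]
    congr 1
    omega
  have h2 := List.take_concat_get hd
  rw [List.concat_eq_append, hg] at h2
  rw [h2]
  congr 1
  omega

lemma pvDepthStep (e : List Char) (i : Nat) (hin : i < e.length) :
    pvDAfter 0 (e.take (i+1)) = pvStep (pvDAfter 0 (e.take i)) e[i] := by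
  have h2 := List.take_concat_get hin
  rw [List.concat_eq_append] at h2
  rw [pvDAfter, pvDAfter, ← h2]
  rw [List.foldl_append]
  rfl

lemma pvSim (e kw : List Char) (hkw : kw ≠ [])
    (hAlt : ('(' ∉ kw ∧ ')' ∉ kw) ∨ ¬ (PySem.Chars.lower kw <:+: PySem.Chars.lower e)) :
    ∀ (fuel i start : Nat) (out : List String),
      start ≤ i → e.length - i < fuel →
      pvLoopA e kw e.length kw.length fuel i (pvDAfter 0 (e.take i)) ((e.drop start).take (i - start)) out
        = out ++ pvRenderB e kw.length start
            (pvCutsB e (PySem.Chars.lower e) (PySem.Chars.lower kw) (pvDepthsB e 0) e.length kw.length fuel i) := by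
  intro fuel
  induction fuel with
  | zero => intro i start out hsi hfu; omega
  | succ fuel ih =>
    intro i start out hsi hfu
    by_cases hin : i < e.length
    · have hgd : e.getD i ' ' = e[i] := List.getD_eq_getElem e ' ' hin
      have hk1 : 1 ≤ kw.length := List.length_pos_of_ne_nil hkw
      have hBhead : ∀ p : Char, (p = '(' ∨ p = ')') → e[i] = p →
          ¬ ((pvDepthsB e 0).getD i 0 = 0 ∧ ((PySem.Chars.lower e).drop i).take kw.length = PySem.Chars.lower kw) := by
        rintro p hp hep ⟨-, habs⟩
        rcases hAlt with ⟨hkl, hkr⟩ | hni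
        case inr =>
          apply hni
          rw [← habs]
          exact ((List.take_prefix _ _).isInfix).trans ((List.drop_suffix _ _).isInfix)
        rw [← pvLowerSlice] at habs
        obtain ⟨c0, t, rfl⟩ : ∃ c0 t, kw = c0 :: t := by
          cases kw with
          | nil => exact absurd rfl hkw
          | cons a b => exact ⟨a, b, rfl⟩
        have hd : (e.drop i).take (c0 :: t).length = e[i] :: ((e.drop (i+1)).take t.length) := by
          rw [List.drop_eq_getElem_cons hin]
          rfl
        rw [hd] at habs
        simp only [PySem.Chars.lower, List.map_cons, List.cons.injEq] at habs
        have hc0 : c0 = p := by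
          apply pvLowerChar_paren c0 p hp
          rw [← habs.1, hep]
          rcases hp with rfl | rfl <;> rfl
        rcases hp with rfl | rfl
        · exact hkl (hc0 ▸ List.mem_cons_self)
        · exact hkr (hc0 ▸ List.mem_cons_self)
      by_cases hpl : e[i] = '('
      · have hd1 : pvDAfter 0 (e.take (i+1)) = pvDAfter 0 (e.take i) + 1 := by
          rw [pvDepthStep e i hin, hpl]
          simp [pvStep]
        simp only [pvLoopA, pvCutsB, if_pos hin, hgd, if_pos hpl,
          if_neg (hBhead '(' (Or.inl rfl) hpl)]
        rw [← hd1, pvBufExt e start i hsi hin]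
        exact ih (i+1) start out (by omega) (by omega)
      · by_cases hpr : e[i] = ')'
        · have hd1 : pvDAfter 0 (e.take (i+1)) = max 0 (pvDAfter 0 (e.take i) - 1) := by
            rw [pvDepthStep e i hin, hpr]
            simp [pvStep]
          simp only [pvLoopA, pvCutsB, if_pos hin, hgd, if_neg hpl, if_pos hpr,
            if_neg (hBhead ')' (Or.inr rfl) hpr)]
          rw [← hd1, pvBufExt e start i hsi hin]
          exact ih (i+1) start out (by omega) (by omega)
        · have hd1 : pvDAfter 0 (e.take (i+1)) = pvDAfter 0 (e.take i) := by
            rw [pvDepthStep e i hin]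
            simp [pvStep, hpl, hpr]
          have hCeq : (pvDAfter 0 (e.take i) = 0 ∧
                PySem.Chars.lower ((e.drop i).take kw.length) = PySem.Chars.lower kw)
              ↔ ((pvDepthsB e 0).getD i 0 = 0 ∧
                ((PySem.Chars.lower e).drop i).take kw.length = PySem.Chars.lower kw) := by
            rw [pvDepthsB_getD e 0 i hin, pvLowerSlice]
          by_cases hm : pvDAfter 0 (e.take i) = 0 ∧
              PySem.Chars.lower ((e.drop i).take kw.length) = PySem.Chars.lower kw
          · simp only [pvLoopA, pvCutsB, if_pos hin, hgd, if_neg hpl, if_neg hpr,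
              if_pos hm, if_pos (hCeq.mp hm)]
            by_cases hb : (PySem.Chars.isalnum (if 0 < i then e.getD (i-1) ' ' else ' ') = false) ∧
                (if 0 < i then e.getD (i-1) ' ' else ' ') ≠ '_' ∧
                (PySem.Chars.isalnum (if i + kw.length < e.length then e.getD (i+kw.length) ' ' else ' ') = false) ∧
                (if i + kw.length < e.length then e.getD (i+kw.length) ' ' else ' ') ≠ '_'
            · obtain ⟨hkl, hkr⟩ : '(' ∉ kw ∧ ')' ∉ kw := by
                rcases hAlt with h | hni
                · exact h
                · exfalso
                  apply hni
                  rw [← hm.2, pvLowerSlice]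
                  exact ((List.take_prefix _ _).isInfix).trans ((List.drop_suffix _ _).isInfix)
              have hkn : i + kw.length ≤ e.length := by
                have hlen := congrArg List.length hm.2
                simp [PySem.Chars.lower] at hlen
                omega
              have hseg := pvSeg_parenfree kw ((e.drop i).take kw.length) hkl hkr hm.2
              have hdep : pvDAfter 0 (e.take (i + kw.length)) = pvDAfter 0 (e.take i) := by
                rw [List.take_add]
                simp only [pvDAfter, List.foldl_append]
                exact pvDAfter_parenfree _ _ hseg
              rw [if_pos hb, if_pos hb, ← hdep]
              have hrec := ih (i + kw.length) (i + kw.length)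
                (pvFlushA ((e.drop start).take (i - start)) out) (le_refl _) (by omega)
              simp only [Nat.sub_self, List.take_zero] at hrec
              rw [hrec]
              simp [pvFlushA, pvRenderB]
            · rw [if_neg hb, if_neg hb, ← hd1, pvBufExt e start i hsi hin]
              exact ih (i+1) start out (by omega) (by omega)
          · simp only [pvLoopA, pvCutsB, if_pos hin, hgd, if_neg hpl, if_neg hpr,
              if_neg hm, if_neg (hCeq.not.mp hm)]
            rw [← hd1, pvBufExt e start i hsi hin]
            exact ih (i+1) start out (by omega) (by omega)
    · have hbuf : (e.drop start).take (i - start) = e.drop start := by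
        apply List.take_of_length_le
        simp
        omega
      simp only [pvLoopA, pvCutsB, if_neg hin, hbuf, pvRenderB, pvFlushA]

-- ===== VERDICT (by name: the statement is the Claim_ definition above) =====
theorem math_split_by_keyword_py_spec : Claim_equal_math_split_by_keyword_py := by
  intro expr keyword _hdom hpre
  obtain ⟨h1, h2⟩ := hpre
  unfold Spec_math_split_by_keyword_py math_split_by_keyword_py math_split_by_keyword_py_alt
  simp only [List.filter_true]
  have := pvSim expr.toList keyword.toList h1 h2 (expr.toList.length + 1) 0 0 [] (le_refl 0) (by omega)
  simpa using this
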